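-- pv_equiv track=rewrite | github.com/MinecartRider/civ102 | test.py | find_shear
-- ===== SOURCE A (Python) =====
-- def find_shear(shear_forces, max_length):
--     current_shear = 0
--     shear = {}
--     for i in range(max_length):
--         shear[i] = current_shear
--         if i in shear_forces:
--             current_shear += shear_forces[i]
--     return shear
-- ===== SOURCE B (Python) =====
-- def find_shear(shear_forces, max_length):
--     running = sum(shear_forces.get(i, 0) for i in range(max_length))
--     out = []
--     for i in range(max_length - 1, -1, -1):
--         running -= shear_forces.get(i, 0)
--         out.append((i, running))
--     return dict(reversed(out))
-- ===== Notes on version B (the rewrite author's own statement) =====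
-- stated objective: alternative
-- what changed: A accumulates the exclusive prefix sums left-to-right with a running adder; B instead computes the grand total first and then sweeps right-to-left, subtracting each value from the total to recover every prefix, building the pairs back-to-front and reversing at the end.
import Mathlib
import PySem

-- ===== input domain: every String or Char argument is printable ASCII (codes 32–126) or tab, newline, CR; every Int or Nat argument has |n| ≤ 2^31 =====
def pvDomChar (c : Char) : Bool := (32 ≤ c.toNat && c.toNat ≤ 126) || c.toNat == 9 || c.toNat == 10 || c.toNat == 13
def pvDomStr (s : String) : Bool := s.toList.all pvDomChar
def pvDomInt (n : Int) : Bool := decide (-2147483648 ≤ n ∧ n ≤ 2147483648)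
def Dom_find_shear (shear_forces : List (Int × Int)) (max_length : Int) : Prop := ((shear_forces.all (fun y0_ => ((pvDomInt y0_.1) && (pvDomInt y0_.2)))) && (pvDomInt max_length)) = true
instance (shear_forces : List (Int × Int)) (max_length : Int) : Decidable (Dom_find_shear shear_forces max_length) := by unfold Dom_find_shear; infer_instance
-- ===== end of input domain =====

-- B computes the grand total first, then sweeps right-to-left subtracting each value to
-- recover the exclusive prefixes, building the pairs back-to-front and reversing; an
-- alternative decomposition of A's left-to-right running-sum loop, same cost.


-- ===== PORT A =====
def find_shear (shear_forces : List (Int × Int)) (max_length : Int) : List (Int × Int) :=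
  let r := (PySem.List.pyRange 0 max_length 1).foldl
    (fun (st : Int × PySem.Dict Int Int) i =>
      let shear := st.2.insert i st.1
      match shear_forces.lookup i with   -- 'if i in shear_forces: current_shear += shear_forces[i]'
      | some v => (st.1 + v, shear)
      | none   => (st.1, shear))
    (0, PySem.Dict.empty)
  r.2.items

-- ===== PORT B =====
def find_shear_alt (shear_forces : List (Int × Int)) (max_length : Int) : List (Int × Int) :=
  -- running = sum(shear_forces.get(i, 0) for i in range(max_length))
  let running0 := ((PySem.List.pyRange 0 max_length 1).map
      (fun i => (shear_forces.lookup i).getD 0)).sum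
  -- for i in range(max_length - 1, -1, -1): running -= ...; out.append((i, running))
  let r := (PySem.List.pyRange (max_length - 1) (-1) (-1)).foldl
    (fun (st : Int × List (Int × Int)) i =>
      let running := st.1 - (shear_forces.lookup i).getD 0
      (running, st.2 ++ [(i, running)]))
    (running0, [])
  -- return dict(reversed(out))
  (r.2.reverse.foldl (fun (d : PySem.Dict Int Int) p => d.insert p.1 p.2)
      PySem.Dict.empty).items

-- ===== PRECONDITION & SPEC =====
def Spec_find_shear (shear_forces : List (Int × Int)) (max_length : Int) (out : List (Int × Int)) : Prop := out = find_shear_alt shear_forces max_length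
instance (shear_forces : List (Int × Int)) (max_length : Int) (out : List (Int × Int)) : Decidable (Spec_find_shear shear_forces max_length out) := by unfold Spec_find_shear; infer_instance

-- ===== CLAIM (what is proved, stated in full; the proofs are below) =====
def Claim_equal_find_shear : Prop := ∀ (shear_forces : List (Int × Int)) (max_length : Int), Dom_find_shear shear_forces max_length → Spec_find_shear shear_forces max_length (find_shear shear_forces max_length)

-- ===== LEMMAS AND PROOFS =====

-- value shear_forces.get(i, 0)
def pvVal (sf : List (Int × Int)) (j : Int) : Int := (sf.lookup j).getD 0

-- exclusive prefix sum of pvVal over 0..n-1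
def pvS (sf : List (Int × Int)) (n : Nat) : Int :=
  ((List.range n).map (fun j : Nat => pvVal sf (j : Int))).sum

-- intended result for n iterations
def pvAns (sf : List (Int × Int)) (n : Nat) : List (Int × Int) :=
  (List.range n).map (fun (k : Nat) => ((k : Int), pvS sf k))

-- the index list range(n)
def pvL (n : Nat) : List Int := (List.range n).map (fun k : Nat => (k : Int))

lemma pvS_succ (sf : List (Int × Int)) (n : Nat) :
    pvS sf (n + 1) = pvS sf n + pvVal sf (n : Int) := by
  simp [pvS, List.range_succ]

lemma pvL_succ (n : Nat) : pvL (n + 1) = pvL n ++ [(n : Int)] := by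
  simp [pvL, List.range_succ]

lemma pvAns_succ (sf : List (Int × Int)) (n : Nat) :
    pvAns sf (n + 1) = pvAns sf n ++ [((n : Int), pvS sf n)] := by
  simp [pvAns, List.range_succ]

-- A's loop characterised
lemma A_fold (sf : List (Int × Int)) : ∀ n : Nat,
    (pvL n).foldl
      (fun (st : Int × PySem.Dict Int Int) i =>
        let shear := st.2.insert i st.1
        match sf.lookup i with
        | some v => (st.1 + v, shear)
        | none   => (st.1, shear))
      (0, PySem.Dict.empty)
    = (pvS sf n, PySem.Dict.mk (pvAns sf n)) := by
  intro n
  induction n with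
  | zero => rfl
  | succ n ih =>
    rw [pvL_succ, List.foldl_append, ih]
    have hcon : (PySem.Dict.mk (pvAns sf n)).contains ((n : Int)) = false := by
      simp only [PySem.Dict.contains_mk]
      simp only [pvAns]
      simp
      omega
    have hins : (PySem.Dict.mk (pvAns sf n)).insert ((n : Int)) (pvS sf n)
        = PySem.Dict.mk (pvAns sf (n + 1)) := by
      apply PySem.Dict.ext
      rw [PySem.Dict.items_insert]
      simp only [hcon]
      simp [pvAns, List.range_succ]
    simp only [List.foldl_cons, List.foldl_nil]
    cases hlk : sf.lookup ((n : Int)) with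
    | none => simp [hins, pvS_succ, pvVal, hlk]
    | some v => simp [hins, pvS_succ, pvVal, hlk]

-- B's backward subtraction loop characterised
lemma B_rev_fold (sf : List (Int × Int)) : ∀ (n : Nat) (acc : List (Int × Int)),
    ((pvL n).reverse).foldl
      (fun (st : Int × List (Int × Int)) i =>
        let running := st.1 - pvVal sf i
        (running, st.2 ++ [(i, running)]))
      (pvS sf n, acc)
    = (0, acc ++ (pvAns sf n).reverse) := by
  intro n
  induction n with
  | zero => intro acc; simp [pvL, pvAns, pvS]
  | succ n ih =>
    intro acc
    rw [pvL_succ, List.reverse_append]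
    simp only [List.reverse_singleton, List.singleton_append, List.foldl_cons]
    have h1 : pvS sf (n + 1) - pvVal sf (n : Int) = pvS sf n := by
      rw [pvS_succ]; ring
    rw [h1]
    rw [ih (acc ++ [((n : Int), pvS sf n)])]
    rw [pvAns_succ]
    simp

-- dict(pairs-with-fresh-increasing-keys) rebuilds the pair list
lemma B_dict_fold (sf : List (Int × Int)) : ∀ n : Nat,
    (pvAns sf n).foldl (fun (d : PySem.Dict Int Int) p => d.insert p.1 p.2)
      PySem.Dict.empty
    = PySem.Dict.mk (pvAns sf n) := by
  intro n
  induction n with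
  | zero => rfl
  | succ n ih =>
    rw [pvAns_succ, List.foldl_append, ih]
    simp only [List.foldl_cons, List.foldl_nil]
    have hcon : (PySem.Dict.mk (pvAns sf n)).contains ((n : Int)) = false := by
      simp only [PySem.Dict.contains_mk]
      simp only [pvAns]
      simp
      omega
    apply PySem.Dict.ext
    rw [PySem.Dict.items_insert]
    simp only [hcon]
    simp [pvAns]

theorem find_shear_eq (sf : List (Int × Int)) (m : Int) :
    find_shear sf m = find_shear_alt sf m := by
  have hrange : PySem.List.pyRange 0 m 1 = pvL (m - 0).toNat := by
    rw [PySem.List.pyRange_one]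
    unfold pvL
    simp only [zero_add]
  have hrev : PySem.List.pyRange (m - 1) (-1) (-1) = (pvL (m - 0).toNat).reverse := by
    have := PySem.List.pyRange_neg_one_eq_reverse (m - 1) (-1)
    rw [this]
    norm_num
    rw [hrange]
    simp
  have hsum : ((pvL (m - 0).toNat).map (fun i => (sf.lookup i).getD 0)).sum
      = pvS sf (m - 0).toNat := by
    unfold pvS pvL pvVal
    rw [List.map_map]
    rfl
  unfold find_shear find_shear_alt
  rw [hrange, hrev, hsum]
  simp only []
  rw [A_fold sf (m - 0).toNat]
  rw [show ((pvL (m - 0).toNat).reverse).foldl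
      (fun (st : Int × List (Int × Int)) i =>
        let running := st.1 - (sf.lookup i).getD 0
        (running, st.2 ++ [(i, running)]))
      (pvS sf (m - 0).toNat, [])
    = (0, [] ++ (pvAns sf (m - 0).toNat).reverse) from B_rev_fold sf (m - 0).toNat []]
  simp only [List.nil_append, List.reverse_reverse]
  rw [B_dict_fold sf (m - 0).toNat]

-- ===== VERDICT (by name: the statement is the Claim_ definition above) =====
theorem find_shear_spec : Claim_equal_find_shear := by
  intro sf m _
  exact find_shear_eq sf m
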